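-- pv_equiv track=rewrite | github.com/skitela/potential-robot | TOOLS/build_stage1_learning_dataset.py | _symbol_base
-- ===== SOURCE A (Python) =====
-- def _symbol_base(sym: str) -> str:
--     s = str(sym or "").strip().upper()
--     if not s:
--         return ""
--     for sep in (".", "-", "_"):
--         if sep in s:
--             s = s.split(sep, 1)[0]
--     return s
-- ===== SOURCE B (Python) =====
-- def _symbol_base(sym: str) -> str:
--     s = str(sym or "").strip().upper()
--     for i, c in enumerate(s):
--         if c in ".-_":
--             return s[:i]
--     return s
-- ===== Notes on version B (the rewrite author's own statement) =====
-- stated objective: simpler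
-- what changed: Replaces the three successive split-and-truncate passes (one per separator) by a single left-to-right scan that slices once at the first separator character (dot, dash or underscore).
import Mathlib
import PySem

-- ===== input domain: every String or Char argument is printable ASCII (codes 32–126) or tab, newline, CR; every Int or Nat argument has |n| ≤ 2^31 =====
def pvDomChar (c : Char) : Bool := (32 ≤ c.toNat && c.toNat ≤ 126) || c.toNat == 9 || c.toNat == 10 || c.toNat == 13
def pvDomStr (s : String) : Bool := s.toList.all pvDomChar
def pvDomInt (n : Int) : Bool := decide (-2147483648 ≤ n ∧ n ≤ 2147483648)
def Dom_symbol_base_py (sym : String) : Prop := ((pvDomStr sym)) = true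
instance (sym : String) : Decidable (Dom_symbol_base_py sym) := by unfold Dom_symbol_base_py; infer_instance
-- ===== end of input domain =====

-- B replaces A's three successive split-and-truncate passes by a single scan that
-- slices once at the first separator (dot, dash or underscore) (return value only; no side effects).

-- ===== PORT A =====
-- for sep in (".","-","_"): if sep in s: s = s.split(sep, 1)[0]
def pvStepA (s : String) (sep : String) : String :=
  if PySem.Str.isIn sep s then (((PySem.Str.splitMax? s sep 1).getD []).headD "") else s

def symbol_base_py (sym : String) : String :=
  let s := PySem.Str.upper (PySem.Str.strip sym)
  if PySem.Str.len s == 0 then ""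
  else (["." , "-", "_"] : List String).foldl pvStepA s

-- ===== PORT B =====
-- the 'for i, c in enumerate(s): if c in ".-_": return s[:i]' loop, as structural recursion
def pvFindSep : List Char → Nat → Option Nat
  | [], _ => none
  | c :: rest, i => if c = '.' ∨ c = '-' ∨ c = '_' then some i else pvFindSep rest (i + 1)

def symbol_base_py_alt (sym : String) : String :=
  let s := PySem.Str.upper (PySem.Str.strip sym)
  match pvFindSep s.toList 0 with
  | some i => String.ofList (s.toList.take i)   -- s[:i] with 0 ≤ i ≤ len s
  | none => s

-- ===== PRECONDITION & SPEC =====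
def Spec_symbol_base_py (sym : String) (out : String) : Prop := out = symbol_base_py_alt sym
instance (sym : String) (out : String) : Decidable (Spec_symbol_base_py sym out) := by unfold Spec_symbol_base_py; infer_instance

-- ===== CLAIM (what is proved, stated in full; the proofs are below) =====
def Claim_equal_symbol_base_py : Prop := ∀ (sym : String), Dom_symbol_base_py sym → Spec_symbol_base_py sym (symbol_base_py sym)

-- ===== LEMMAS AND PROOFS =====

-- ===== VERDICT (by name: the statement is the Claim_ definition above) =====
-- head of splitOnMax.go with maxsplit exhausted (m = 0)
theorem pv_go_zero (sep : List Char) (fuel : Nat) (l cur : List Char) (acc : List (List Char)) :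
    PySem.Chars.splitOnMax.go sep fuel 0 l cur acc = ((cur.reverse ++ l) :: acc).reverse := by
  cases fuel <;> cases l <;> simp [PySem.Chars.splitOnMax.go]

-- head of splitOnMax.go with maxsplit 1 and a single-char separator is the prefix before c
theorem pv_go_one_head (c : Char) (fuel : Nat) :
    ∀ (l cur : List Char), l.length ≤ fuel →
      (PySem.Chars.splitOnMax.go [c] fuel 1 l cur []).head? =
        some (cur.reverse ++ l.takeWhile (fun x => !(x == c))) := by
  induction fuel with
  | zero =>
    intro l cur h
    have : l = [] := List.length_eq_zero_iff.mp (Nat.le_zero.mp h)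
    subst this
    simp [PySem.Chars.splitOnMax.go]
  | succ n ih =>
    intro l cur h
    cases l with
    | nil => simp [PySem.Chars.splitOnMax.go]
    | cons a rest =>
      by_cases hc : a = c
      · subst hc
        simp [PySem.Chars.splitOnMax.go, List.isPrefixOf, pv_go_zero]
      · have hp : [c].isPrefixOf (a :: rest) = false := by
          simp [List.isPrefixOf]
          exact fun h' => (hc h'.symm).elim
        have hlen : rest.length ≤ n := by simpa using h
        simp [PySem.Chars.splitOnMax.go, hp, ih rest (a :: cur) hlen, hc]

theorem pv_split_head (l : List Char) (c : Char) :
    (PySem.Chars.splitOnMax l [c] 1).head? = some (l.takeWhile (fun x => !(x == c))) := by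
  unfold PySem.Chars.splitOnMax
  rw [if_neg (by norm_num)]
  simpa using pv_go_one_head c (l.length + 1) l [] (Nat.le_succ _)

-- one pass of A's loop body = cut before the first occurrence of c
theorem pv_stepA_eq (s : String) (sepStr : String) (c : Char) (hs : sepStr.toList = [c]) :
    pvStepA s sepStr = String.ofList (s.toList.takeWhile (fun x => !(x == c))) := by
  unfold pvStepA
  by_cases h : PySem.Str.isIn sepStr s
  · rw [if_pos h]
    unfold PySem.Str.splitMax?
    rw [hs]
    unfold PySem.Chars.splitMax?
    simp only [List.isEmpty_cons, if_false, Option.map_some, Option.getD_some]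
    have hh := pv_split_head s.toList c
    cases heq : (PySem.Chars.splitOnMax s.toList [c] 1) with
    | nil => simp [heq] at hh
    | cons x xs =>
      rw [heq] at hh
      simp at hh
      simp [List.headD, hh]
  · rw [if_neg h]
    have hnotin : c ∉ s.toList := by
      intro hmem
      apply h
      rw [PySem.Str.isIn_eq, hs]
      rw [PySem.Chars.isIn_iff_infix]
      exact (List.singleton_infix_iff c s.toList).mpr hmem
    have : s.toList.takeWhile (fun x => !(x == c)) = s.toList := by
      apply List.takeWhile_eq_self_iff.mpr
      intro x hx
      simp
      intro he; exact hnotin (he ▸ hx)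
    rw [this]
    exact String.ofList_toList.symm

-- B's scan = takeWhile
theorem pv_findSep_shift (l : List Char) : ∀ (i : Nat), pvFindSep l i = (pvFindSep l 0).map (· + i) := by
  induction l with
  | nil => intro i; simp [pvFindSep]
  | cons a rest ih =>
    intro i
    by_cases h : a = '.' ∨ a = '-' ∨ a = '_'
    · simp [pvFindSep, h]
    · simp only [pvFindSep, if_neg h]
      rw [ih (i + 1), ih 1]
      cases pvFindSep rest 0 <;> simp <;> omega

theorem pv_bcore (l : List Char) :
    (match pvFindSep l 0 with
     | some i => l.take i
     | none => l) = l.takeWhile (fun x => !(x == '.' || x == '-' || x == '_')) := by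
  induction l with
  | nil => simp [pvFindSep]
  | cons a rest ih =>
    by_cases h : a = '.' ∨ a = '-' ∨ a = '_'
    · have hb : (!(a == '.' || a == '-' || a == '_')) = false := by
        rcases h with h | h | h <;> simp [h]
      simp [pvFindSep, h, List.takeWhile, hb]
    · have hb : (!(a == '.' || a == '-' || a == '_')) = true := by
        push_neg at h
        simp [h.1, h.2.1, h.2.2]
      simp only [pvFindSep, if_neg h]
      rw [pv_findSep_shift rest 1]
      rw [List.takeWhile_cons, hb, if_pos rfl]
      cases hfs : pvFindSep rest 0 with
      | none => rw [hfs] at ih; simpa using ih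
      | some j => rw [hfs] at ih; simp at ih ⊢; rw [← ih]

-- ===== VERDICT =====
theorem pv_alt_eq (u : String) :
    (match pvFindSep u.toList 0 with
     | some i => String.ofList (u.toList.take i)
     | none => u) =
      String.ofList (u.toList.takeWhile (fun x => !(x == '.' || x == '-' || x == '_'))) := by
  have hb := pv_bcore u.toList
  cases h : pvFindSep u.toList 0 with
  | none =>
    rw [h] at hb
    simp only at hb ⊢
    rw [← hb]
    exact String.ofList_toList.symm
  | some i =>
    rw [h] at hb
    simp only at hb ⊢
    rw [hb]

theorem pv_A_eq (u : String) :
    (if PySem.Str.len u == 0 then ""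
     else (["." , "-", "_"] : List String).foldl pvStepA u) =
      String.ofList (u.toList.takeWhile (fun x => !(x == '.' || x == '-' || x == '_'))) := by
  by_cases he : u.toList = []
  · rw [he]
    rw [if_pos (by simp [PySem.Str.len, he])]
    simp
  · rw [if_neg (by
      simp only [PySem.Str.len, beq_iff_eq, Nat.cast_eq_zero, List.length_eq_zero_iff]
      exact he)]
    simp only [List.foldl]
    rw [pv_stepA_eq _ "." '.' (by decide), pv_stepA_eq _ "-" '-' (by decide),
        pv_stepA_eq _ "_" '_' (by decide)]
    simp only [String.toList_ofList, List.takeWhile_takeWhile]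
    congr 1
    congr 1
    funext x
    cases hx1 : x == '.' <;> cases hx2 : x == '-' <;> cases hx3 : x == '_' <;>
      simp [hx1, hx2, hx3]

-- ===== VERDICT =====
theorem symbol_base_py_spec : Claim_equal_symbol_base_py := by
  intro sym _
  unfold Spec_symbol_base_py symbol_base_py symbol_base_py_alt
  simp only
  rw [pv_A_eq, pv_alt_eq]
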